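-- pv_equiv track=rewrite | github.com/chimtrangbu/HandwritenFormularToLatex | Latex/Latex.py | filename2formula
-- ===== SOURCE A (Python) =====
-- def filename2formula(filename):
--     pos = filename.rfind("_")
--     correct = filename[:pos]
--     for symbol in ["leq","neq","geq","lambda","alpha","beta","frac"]:
--         correct = correct.replace("#"+symbol, "\\"+symbol)
--     correct = correct.replace("#lt", "<")
--     correct = correct.replace("#gt", ">")
--     return correct
-- ===== SOURCE B (Python) =====
-- # Single table-driven left-to-right pass instead of nine sequential full-string
-- # .replace scans; the prefix extraction (rfind/slice, including pos == -1) is kept.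
-- _TABLE = (
--     ("leq", "\\leq"), ("neq", "\\neq"), ("geq", "\\geq"),
--     ("lambda", "\\lambda"), ("alpha", "\\alpha"), ("beta", "\\beta"),
--     ("frac", "\\frac"), ("lt", "<"), ("gt", ">"),
-- )
--
--
-- def filename2formula(filename):
--     s = filename[:filename.rfind("_")]
--     out = []
--     i = 0
--     n = len(s)
--     while i < n:
--         hit = None
--         if s[i] == "#":
--             for word, rep in _TABLE:
--                 if s.startswith(word, i + 1):
--                     hit = (word, rep)
--                     break
--         if hit is not None:
--             out.append(hit[1])
--             i += 1 + len(hit[0])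
--         else:
--             out.append(s[i])
--             i += 1
--     return "".join(out)
-- ===== Notes on version B (the rewrite author's own statement) =====
-- stated objective: alternative
-- what changed: Replaces the nine sequential full-string str.replace passes with a single left-to-right table-driven pass that substitutes each marked token as it is scanned (exact because no token is a prefix of another and no replacement text contains the marker character).
import Mathlib
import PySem

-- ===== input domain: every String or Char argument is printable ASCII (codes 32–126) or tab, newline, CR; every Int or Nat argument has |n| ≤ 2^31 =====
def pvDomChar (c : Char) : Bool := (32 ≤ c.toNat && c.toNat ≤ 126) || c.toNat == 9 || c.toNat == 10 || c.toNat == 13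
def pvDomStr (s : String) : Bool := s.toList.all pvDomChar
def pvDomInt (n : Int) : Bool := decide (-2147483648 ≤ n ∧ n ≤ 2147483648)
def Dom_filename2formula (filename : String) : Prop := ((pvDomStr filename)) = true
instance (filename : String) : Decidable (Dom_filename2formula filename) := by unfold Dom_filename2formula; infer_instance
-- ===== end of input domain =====

-- B replaces A's nine sequential full-string replace passes by one table-driven
-- left-to-right pass (objective: alternative single-pass algorithm, same results).

-- ===== PORT A =====
def filename2formula (filename : String) : String :=
  let pos := PySem.Str.rfind filename "_"
  let correct := PySem.Str.slice filename none (some pos)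
  let correct := List.foldl
    (fun correct sym => PySem.Str.replace correct ("#" ++ sym) ("\\" ++ sym))
    correct ["leq", "neq", "geq", "lambda", "alpha", "beta", "frac"]
  let correct := PySem.Str.replace correct "#lt" "<"
  PySem.Str.replace correct "#gt" ">"

-- ===== PORT B =====
-- Source B's replacement table, as (word, replacement) over code points
def pvTable : List (List Char × List Char) :=
  [(['l','e','q'], ['\\','l','e','q']), (['n','e','q'], ['\\','n','e','q']),
   (['g','e','q'], ['\\','g','e','q']), (['l','a','m','b','d','a'], ['\\','l','a','m','b','d','a']),
   (['a','l','p','h','a'], ['\\','a','l','p','h','a']), (['b','e','t','a'], ['\\','b','e','t','a']),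
   (['f','r','a','c'], ['\\','f','r','a','c']), (['l','t'], ['<']),
   (['g','t'], ['>'])]

-- Source B's while-loop: at each position try the table (first match, only behind '#'),
-- emit the replacement and skip the token, else emit the character
def pvSub (P : List (List Char × List Char)) : List Char → List Char
  | [] => []
  | c :: t =>
    match P.find? (fun p => ('#' :: p.1).isPrefixOf (c :: t)) with
    | some p => p.2 ++ pvSub P (List.drop p.1.length t)
    | none => c :: pvSub P t
termination_by s => s.length
decreasing_by all_goals simp

def filename2formula_alt (filename : String) : String :=
  let pos := PySem.Str.rfind filename "_"
  let correct := PySem.Str.slice filename none (some pos)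
  String.ofList (pvSub pvTable correct.toList)

-- ===== PRECONDITION & SPEC =====
def Spec_filename2formula (filename : String) (out : String) : Prop := out = filename2formula_alt filename
instance (filename : String) (out : String) : Decidable (Spec_filename2formula filename out) := by unfold Spec_filename2formula; infer_instance

-- ===== CLAIM (what is proved, stated in full; the proofs are below) =====
def Claim_equal_filename2formula : Prop := ∀ (filename : String), Dom_filename2formula filename → Spec_filename2formula filename (filename2formula filename)

-- ===== LEMMAS AND PROOFS =====

-- Structural-recursion version of Python's str.replace (for a nonempty pattern)
def pvRep (old new : List Char) : List Char → List Char
  | [] => []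
  | c :: t =>
    if old.isPrefixOf (c :: t) then new ++ pvRep old new (List.drop (old.length - 1) t)
    else c :: pvRep old new t
termination_by s => s.length
decreasing_by all_goals simp

theorem pvRep_nil (old new : List Char) : pvRep old new [] = [] := by
  simp [pvRep]

theorem pvRep_cons_pos (old new : List Char) (c : Char) (t : List Char)
    (h : old.isPrefixOf (c :: t) = true) :
    pvRep old new (c :: t) = new ++ pvRep old new (List.drop (old.length - 1) t) := by
  rw [pvRep]; simp [h]

theorem pvRep_cons_neg (old new : List Char) (c : Char) (t : List Char)
    (h : ¬ old.isPrefixOf (c :: t) = true) :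
    pvRep old new (c :: t) = c :: pvRep old new t := by
  rw [pvRep]; simp [h]

theorem pvSub_nil (P : List (List Char × List Char)) : pvSub P [] = [] := by
  simp [pvSub]

-- A's nine replaces, as a fold of pvRep over the table
def pvChain (P : List (List Char × List Char)) (s : List Char) : List Char :=
  P.foldl (fun acc p => pvRep ('#' :: p.1) p.2 acc) s

theorem pvChain_cons_def (p : List Char × List Char) (P : List (List Char × List Char))
    (s : List Char) : pvChain (p :: P) s = pvChain P (pvRep ('#' :: p.1) p.2 s) := rfl

-- the hypotheses that make the nine-pass chain equal the single pass
def pvGood (P : List (List Char × List Char)) : Prop :=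
  (∀ p ∈ P, p.1 ≠ [] ∧ '#' ∉ p.1 ∧ p.2 ≠ [] ∧ '#' ∉ p.2) ∧
  (∀ p ∈ P, ∀ q ∈ P, ∀ a ∈ p.2.take 1, a ∉ q.1) ∧
  (∀ p ∈ P, ∀ q ∈ P, p.1 ≠ q.1 → ¬ ('#' :: p.1) <+: ('#' :: q.1))

theorem pvGood_cons {p : List Char × List Char} {P : List (List Char × List Char)}
    (h : pvGood (p :: P)) : pvGood P := by
  obtain ⟨h1, h2, h3⟩ := h
  exact ⟨fun q hq => h1 q (List.mem_cons_of_mem _ hq),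
         fun q hq r hr => h2 q (List.mem_cons_of_mem _ hq) r (List.mem_cons_of_mem _ hr),
         fun q hq r hr => h3 q (List.mem_cons_of_mem _ hq) r (List.mem_cons_of_mem _ hr)⟩

-- PySem's fueled str.replace equals pvRep once the fuel covers the string
theorem pvRep_go (old new : List Char) (hold : old ≠ []) :
    ∀ (fuel : Nat) (l acc : List Char), l.length ≤ fuel →
      PySem.Chars.replace.go old new fuel l acc = acc.reverse ++ pvRep old new l := by
  intro fuel
  induction fuel with
  | zero =>
    intro l acc h
    have hl : l = [] := by cases l with
      | nil => rfl
      | cons c t => simp at h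
    subst hl
    rw [PySem.Chars.replace.go.eq_def]
    simp [pvRep_nil]
  | succ n ih =>
    intro l acc h
    cases l with
    | nil =>
      rw [PySem.Chars.replace.go.eq_def]
      simp [pvRep_nil]
    | cons c t =>
      obtain ⟨o, os, rfl⟩ : ∃ o os, old = o :: os := by
        cases old with
        | nil => exact absurd rfl hold
        | cons o os => exact ⟨o, os, rfl⟩
      rw [PySem.Chars.replace.go.eq_def]
      by_cases hp : (o :: os).isPrefixOf (c :: t) = true
      · simp only [hp, if_true]
        rw [ih _ _ (by simp at h ⊢; omega)]
        rw [pvRep_cons_pos _ _ _ _ hp]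
        simp [List.drop_succ_cons]
      · simp only [hp, if_false, Bool.false_eq_true]
        rw [ih t (c :: acc) (by simp at h ⊢; omega)]
        rw [pvRep_cons_neg _ _ _ _ hp]
        simp

theorem replace_eq_pvRep (s old new : List Char) (hold : old ≠ []) :
    PySem.Chars.replace s old new = pvRep old new s := by
  rw [PySem.Chars.replace]
  have : old.isEmpty = false := by simp [hold]
  rw [this]
  simp only [Bool.false_eq_true, if_false]
  rw [pvRep_go old new hold s.length s [] le_rfl]
  simp

-- a '#'-free block passes through pvRep untouched
theorem pvRep_hash_free (w r : List Char) :
    ∀ (u v : List Char), '#' ∉ u →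
      pvRep ('#' :: w) r (u ++ v) = u ++ pvRep ('#' :: w) r v := by
  intro u
  induction u with
  | nil => intro v _; simp
  | cons a u ih =>
    intro v hu
    have ha : a ≠ '#' := by simp at hu; tauto
    have hu' : '#' ∉ u := by simp at hu; tauto
    have hnp : ¬ (('#' :: w).isPrefixOf (a :: (u ++ v)) = true) := by
      simp [List.isPrefixOf]
      intro hc; exact absurd hc.symm ha
    rw [List.cons_append, pvRep_cons_neg _ _ _ _ hnp, ih v hu', List.cons_append]

-- a '#'-free pattern that is a prefix of pvRep's output was a prefix of its input
theorem pvRep_prefix_back (w' : List Char) (a : Char) (r : List Char) :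
    ∀ (u w : List Char), '#' ∉ w → a ∉ w →
      w <+: pvRep ('#' :: w') (a :: r) u → w <+: u := by
  intro u
  induction u with
  | nil => intro w _ _ hp; simpa [pvRep_nil] using hp
  | cons c t ih =>
    intro w hw ha hp
    cases w with
    | nil => exact List.nil_prefix
    | cons b w1 =>
      by_cases hm : ('#' :: w').isPrefixOf (c :: t) = true
      · rw [pvRep_cons_pos _ _ _ _ hm] at hp
        rw [List.cons_append, List.cons_prefix_cons] at hp
        have : a ≠ b := by simp at ha; tauto
        exact absurd hp.1.symm this
      · rw [pvRep_cons_neg _ _ _ _ hm, List.cons_prefix_cons] at hp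
        obtain ⟨rfl, hp1⟩ := hp
        have hw1 : '#' ∉ w1 := by simp at hw; tauto
        have ha1 : a ∉ w1 := by simp at ha; tauto
        exact List.cons_prefix_cons.mpr ⟨rfl, ih w1 hw1 ha1 hp1⟩

-- a '#'-free block passes through the whole chain untouched
theorem pvChain_hash_free (P : List (List Char × List Char)) :
    ∀ (u v : List Char), '#' ∉ u →
      pvChain P (u ++ v) = u ++ pvChain P v := by
  intro u v hu
  induction P generalizing v with
  | nil => rfl
  | cons p P ih =>
    rw [pvChain_cons_def, pvRep_hash_free _ _ _ _ hu, ih, pvChain_cons_def]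

theorem pvChain_nil (P : List (List Char × List Char)) : pvChain P [] = [] := by
  induction P with
  | nil => rfl
  | cons p P ih => rw [pvChain_cons_def, pvRep_nil, ih]

-- a pattern distinct from p₀'s can never match at a position where p₀'s pattern sits
theorem pv_no_cross_match (w₀ wq : List Char)
    (h1 : ¬ ('#' :: wq) <+: ('#' :: w₀)) (h2 : ¬ ('#' :: w₀) <+: ('#' :: wq)) :
    ∀ Y, ¬ (('#' :: wq).isPrefixOf (('#' :: w₀) ++ Y) = true) := by
  intro Y h
  rw [List.isPrefixOf_iff_prefix] at h
  rcases List.prefix_or_prefix_of_prefix h (List.prefix_append ('#' :: w₀) Y) with h' | h'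
  · -- '#'::wq <+: '#'::w₀
    exact h1 h'
  · exact h2 h'

-- if nothing matches at the head, the chain emits the head character
theorem pvChain_cons_nomatch :
    ∀ (P : List (List Char × List Char)), pvGood P → ∀ (c : Char) (t : List Char),
      (∀ p ∈ P, ¬ (('#' :: p.1).isPrefixOf (c :: t) = true)) →
      pvChain P (c :: t) = c :: pvChain P t := by
  intro P
  induction P with
  | nil => intro _ c t _; rfl
  | cons p P ih =>
    intro hG c t hnm
    obtain ⟨h1, h2, h3⟩ := hG
    have hmemp : p ∈ p :: P := List.mem_cons_self
    have hnp : ¬ (('#' :: p.1).isPrefixOf (c :: t) = true) := hnm p hmemp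
    rw [pvChain_cons_def, pvRep_cons_neg _ _ _ _ hnp]
    have hnm' : ∀ q ∈ P, ¬ (('#' :: q.1).isPrefixOf (c :: pvRep ('#' :: p.1) p.2 t) = true) := by
      intro q hq hpre
      by_cases hc : c = '#'
      · subst hc
        rw [List.isPrefixOf_iff_prefix, List.cons_prefix_cons] at hpre
        obtain ⟨a, r, hp2⟩ : ∃ a r, p.2 = a :: r := by
          rcases he : p.2 with _ | ⟨a, r⟩
          · exact absurd he (h1 p hmemp).2.2.1
          · exact ⟨a, r, rfl⟩
        have haq : a ∉ q.1 :=
          h2 p hmemp q (List.mem_cons_of_mem _ hq) a (by simp [hp2])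
        have hhq : '#' ∉ q.1 := (h1 q (List.mem_cons_of_mem _ hq)).2.1
        have hq1 : q.1 <+: pvRep ('#' :: p.1) (a :: r) t := hp2 ▸ hpre.2
        have := pvRep_prefix_back p.1 a r t q.1 hhq haq hq1
        exact hnm q (List.mem_cons_of_mem _ hq)
          (by rw [List.isPrefixOf_iff_prefix, List.cons_prefix_cons]; exact ⟨rfl, this⟩)
      · rw [List.isPrefixOf_iff_prefix, List.cons_prefix_cons] at hpre
        exact hc hpre.1.symm
    rw [ih (pvGood_cons ⟨h1, h2, h3⟩) c (pvRep ('#' :: p.1) p.2 t) hnm', pvChain_cons_def]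

-- if p₀ matches at the head, the chain emits p₀'s replacement and skips the token
theorem pvChain_cons_match :
    ∀ (Pa Pb : List (List Char × List Char)) (p₀ : List Char × List Char),
      pvGood (Pa ++ p₀ :: Pb) → (∀ q ∈ Pa, q.1 ≠ p₀.1) →
      ∀ X, pvChain (Pa ++ p₀ :: Pb) (('#' :: p₀.1) ++ X)
            = p₀.2 ++ pvChain (Pa ++ p₀ :: Pb) X := by
  intro Pa
  induction Pa with
  | nil =>
    intro Pb p₀ hG _ X
    obtain ⟨h1, h2, h3⟩ := hG
    simp only [List.nil_append] at *
    rw [pvChain_cons_def]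
    have hm : ('#' :: p₀.1).isPrefixOf (('#' :: p₀.1) ++ X) = true := by
      rw [List.isPrefixOf_iff_prefix]; exact List.prefix_append _ _
    have he : ('#' :: p₀.1) ++ X = '#' :: (p₀.1 ++ X) := rfl
    rw [he] at hm
    rw [he, pvRep_cons_pos _ _ _ _ hm]
    have hd : List.drop (('#' :: p₀.1).length - 1) (p₀.1 ++ X) = X := by
      simp
    rw [hd]
    have hhash : '#' ∉ p₀.2 := (h1 p₀ List.mem_cons_self).2.2.2
    rw [pvChain_hash_free _ _ _ hhash, pvChain_cons_def]
  | cons q Pa ih =>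
    intro Pb p₀ hG hne X
    obtain ⟨h1, h2, h3⟩ := hG
    have hq1 : q.1 ≠ p₀.1 := hne q List.mem_cons_self
    have hqmem : q ∈ (q :: Pa) ++ p₀ :: Pb := List.mem_cons_self
    have hpmem : p₀ ∈ (q :: Pa) ++ p₀ :: Pb := by simp
    have hnomatch : ¬ (('#' :: q.1).isPrefixOf (('#' :: p₀.1) ++ X) = true) :=
      pv_no_cross_match p₀.1 q.1 (h3 q hqmem p₀ hpmem hq1) (h3 p₀ hpmem q hqmem (Ne.symm hq1)) X
    rw [List.cons_append, pvChain_cons_def]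
    have hstep : pvRep ('#' :: q.1) q.2 (('#' :: p₀.1) ++ X)
        = ('#' :: p₀.1) ++ pvRep ('#' :: q.1) q.2 X := by
      have he : ('#' :: p₀.1) ++ X = '#' :: (p₀.1 ++ X) := rfl
      rw [he] at hnomatch
      rw [he, pvRep_cons_neg _ _ _ _ hnomatch]
      have hh : '#' ∉ p₀.1 := (h1 p₀ hpmem).2.1
      rw [pvRep_hash_free _ _ _ _ hh]
      rfl
    rw [hstep]
    have hG' : pvGood (Pa ++ p₀ :: Pb) := pvGood_cons (by rw [← List.cons_append]; exact ⟨h1, h2, h3⟩)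
    rw [ih Pb p₀ hG' (fun r hr => hne r (List.mem_cons_of_mem _ hr)) (pvRep ('#' :: q.1) q.2 X)]
    rw [pvChain_cons_def]

-- the chain of single replaces is Source B's single pass
theorem pvChain_eq_pvSub (P : List (List Char × List Char)) (hG : pvGood P) :
    ∀ (n : Nat) (s : List Char), s.length ≤ n → pvChain P s = pvSub P s := by
  intro n
  induction n with
  | zero =>
    intro s hs
    have : s = [] := by
      cases s with
      | nil => rfl
      | cons c t => simp at hs
    subst this
    rw [pvChain_nil, pvSub_nil]
  | succ n ih =>
    intro s hs
    cases s with
    | nil => rw [pvChain_nil, pvSub_nil]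
    | cons c t =>
      rcases hfind : P.find? (fun p => ('#' :: p.1).isPrefixOf (c :: t)) with _ | p₀
      · have hall : ∀ p ∈ P, ¬ (('#' :: p.1).isPrefixOf (c :: t) = true) :=
          fun p hp => by simpa using List.find?_eq_none.mp hfind p hp
        rw [pvChain_cons_nomatch P hG c t hall, ih t (by simp at hs; omega)]
        rw [pvSub]
        rw [hfind]
      · obtain ⟨hp₀, Pa, Pb, hP, hbefore⟩ := List.find?_eq_some_iff_append.mp hfind
        have hpre := List.isPrefixOf_iff_prefix.mp hp₀
        rw [List.cons_prefix_cons] at hpre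
        obtain ⟨hc, hpre2⟩ := hpre
        obtain ⟨X, hX⟩ := hpre2
        have hne : ∀ q ∈ Pa, q.1 ≠ p₀.1 := by
          intro q hq h
          have hfq := hbefore q hq
          rw [show ('#' :: q.1) = ('#' :: p₀.1) from by rw [h], hp₀] at hfq
          simp at hfq
        have hct : c :: t = ('#' :: p₀.1) ++ X := by
          rw [← hc, List.cons_append, hX]
        have hGP : pvGood (Pa ++ p₀ :: Pb) := hP ▸ hG
        have hXlen : X.length ≤ n := by
          have : t.length ≤ n := by simp at hs; omega
          have : X.length ≤ t.length := by rw [← hX]; simp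
          omega
        calc pvChain P (c :: t)
            = pvChain (Pa ++ p₀ :: Pb) (('#' :: p₀.1) ++ X) := by rw [← hct, hP]
          _ = p₀.2 ++ pvChain (Pa ++ p₀ :: Pb) X := pvChain_cons_match Pa Pb p₀ hGP hne X
          _ = p₀.2 ++ pvSub P X := by rw [← hP, ih X hXlen]
          _ = pvSub P (c :: t) := by
              rw [pvSub, hfind]
              have hdr : List.drop p₀.1.length t = X := by
                rw [← hX, List.drop_left]
              show p₀.2 ++ pvSub P X = p₀.2 ++ pvSub P (List.drop p₀.1.length t)
              rw [hdr]

-- Boolean form of pvGood, so the concrete table is checked by evaluation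
def pvGoodB (P : List (List Char × List Char)) : Bool :=
  (P.all fun p => (!p.1.isEmpty) && p.1.all (fun c => c != '#') && (!p.2.isEmpty)
      && p.2.all (fun c => c != '#')) &&
  (P.all fun p => P.all fun q => (p.2.take 1).all fun a => q.1.all fun c => c != a) &&
  (P.all fun p => P.all fun q => (p.1 == q.1) || !(('#' :: p.1).isPrefixOf ('#' :: q.1)))

theorem pvGood_of_B (P : List (List Char × List Char)) (h : pvGoodB P = true) : pvGood P := by
  unfold pvGoodB at h
  simp only [Bool.and_eq_true] at h
  obtain ⟨⟨hA, hB⟩, hC⟩ := h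
  refine ⟨?_, ?_, ?_⟩
  · intro p hp
    have hh := List.all_eq_true.mp hA p hp
    simp only [Bool.and_eq_true] at hh
    obtain ⟨⟨⟨h1, h2⟩, h3⟩, h4⟩ := hh
    refine ⟨?_, ?_, ?_, ?_⟩
    · intro hnil; rw [hnil] at h1; simp at h1
    · intro hmem; have := List.all_eq_true.mp h2 '#' hmem; simp at this
    · intro hnil; rw [hnil] at h3; simp at h3
    · intro hmem; have := List.all_eq_true.mp h4 '#' hmem; simp at this
  · intro p hp q hq a ha hmem
    have h5 := List.all_eq_true.mp (List.all_eq_true.mp hB p hp) q hq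
    have h6 := List.all_eq_true.mp (List.all_eq_true.mp h5 a ha) a hmem
    simp at h6
  · intro p hp q hq hne hpre
    have h8 := List.all_eq_true.mp (List.all_eq_true.mp hC p hp) q hq
    simp only [Bool.or_eq_true, beq_iff_eq, Bool.not_eq_true'] at h8
    rcases h8 with h8 | h8
    · exact hne h8
    · rw [← List.isPrefixOf_iff_prefix, h8] at hpre
      exact Bool.false_ne_true hpre

theorem pvGood_table : pvGood pvTable := pvGood_of_B _ (by rfl)

-- A's replace cascade equals B's single pass, for any starting string
theorem chain9_eq (c : String) :
    PySem.Str.replace (PySem.Str.replace (List.foldl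
        (fun correct sym => PySem.Str.replace correct ("#" ++ sym) ("\\" ++ sym))
        c ["leq", "neq", "geq", "lambda", "alpha", "beta", "frac"]) "#lt" "<") "#gt" ">"
      = String.ofList (pvSub pvTable c.toList) := by
  have hinj : ∀ a b : String, a.toList = b.toList → a = b := by
    intro a b h
    have ha : String.ofList a.toList = a := by simp
    have hb : String.ofList b.toList = b := by simp
    rw [← ha, ← hb, h]
  apply hinj
  simp only [List.foldl, PySem.Str.toList_replace]
  have hrw : ∀ (s w nw : List Char), PySem.Chars.replace s ('#' :: w) nw = pvRep ('#' :: w) nw s :=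
    fun s w nw => replace_eq_pvRep s _ nw (by simp)
  have e : ∀ sym : String, ("#" ++ sym).toList = '#' :: sym.toList := by
    intro sym; rw [String.toList_append]; rfl
  rw [e, e, e, e, e, e, e]
  rw [show ("#lt" : String).toList = '#' :: ("lt" : String).toList from by decide]
  rw [show ("#gt" : String).toList = '#' :: ("gt" : String).toList from by decide]
  rw [hrw, hrw, hrw, hrw, hrw, hrw, hrw, hrw, hrw]
  rw [show (String.ofList (pvSub pvTable c.toList)).toList = pvSub pvTable c.toList from by simp]
  rw [← pvChain_eq_pvSub pvTable pvGood_table c.toList.length c.toList le_rfl]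
  simp [pvChain, pvTable, List.foldl]

-- ===== VERDICT (by name: the statement is the Claim_ definition above) =====
theorem filename2formula_spec : Claim_equal_filename2formula := by
  intro filename _
  unfold Spec_filename2formula filename2formula filename2formula_alt
  exact chain9_eq _
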